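-- pv_equiv track=rewrite | github.com/Tw1stzzzzy/research-trend-agent | processors/report_generator.py | _generate_focus_from_title
-- ===== SOURCE A (Python) =====
-- def _generate_focus_from_title(title):
--     """
--     Based on paper title, generate a brief research focus description
--     """
--     title_lower = title.lower()
--
--     if any(word in title_lower for word in ['transformer', 'attention', 'bert', 'gpt']):
--         return "Transformer-based architecture for improved performance"
--     elif any(word in title_lower for word in ['diffusion', 'generative', 'gan']):
--         return "Generative modeling and image synthesis"
--     elif any(word in title_lower for word in ['detection', 'segmentation', 'classification']):
--         return "Computer vision and object recognition"
--     elif any(word in title_lower for word in ['graph', 'network', 'neural']):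
--         return "Neural network architecture and graph learning"
--     elif any(word in title_lower for word in ['quantization', 'compression', 'efficient']):
--         return "Model optimization and efficiency improvements"
--     else:
--         return "Novel approach to machine learning challenges"
-- ===== SOURCE B (Python) =====
-- # B: flat keyword->priority map scanned once, keeping the minimum (highest-priority)
-- # matching category index; correct because returning the first if/elif branch that
-- # fires is the same as returning the smallest matching category index.
-- KEYWORD_PRIORITY = {
--     'transformer': 0, 'attention': 0, 'bert': 0, 'gpt': 0,
--     'diffusion': 1, 'generative': 1, 'gan': 1,
--     'detection': 2, 'segmentation': 2, 'classification': 2,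
--     'graph': 3, 'network': 3, 'neural': 3,
--     'quantization': 4, 'compression': 4, 'efficient': 4,
-- }
--
-- FOCUSES = [
--     "Transformer-based architecture for improved performance",
--     "Generative modeling and image synthesis",
--     "Computer vision and object recognition",
--     "Neural network architecture and graph learning",
--     "Model optimization and efficiency improvements",
--     "Novel approach to machine learning challenges",  # default (no keyword matches)
-- ]
--
--
-- def _generate_focus_from_title(title):
--     """Classify a paper title: min priority index over all matching keywords."""
--     title_lower = title.lower()
--     best = len(FOCUSES) - 1  # default index
--     for keyword, priority in KEYWORD_PRIORITY.items():
--         if priority < best and keyword in title_lower: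
--             best = priority
--     return FOCUSES[best]
-- ===== Notes on version B (the rewrite author's own statement) =====
-- stated objective: alternative
-- what changed: A's ordered if/elif chain of group-any checks is replaced by a single pass over a flat keyword->priority map keeping the minimum matching priority index, which indexes a focus table; correct since the first firing branch equals the smallest matching category.
import Mathlib
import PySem

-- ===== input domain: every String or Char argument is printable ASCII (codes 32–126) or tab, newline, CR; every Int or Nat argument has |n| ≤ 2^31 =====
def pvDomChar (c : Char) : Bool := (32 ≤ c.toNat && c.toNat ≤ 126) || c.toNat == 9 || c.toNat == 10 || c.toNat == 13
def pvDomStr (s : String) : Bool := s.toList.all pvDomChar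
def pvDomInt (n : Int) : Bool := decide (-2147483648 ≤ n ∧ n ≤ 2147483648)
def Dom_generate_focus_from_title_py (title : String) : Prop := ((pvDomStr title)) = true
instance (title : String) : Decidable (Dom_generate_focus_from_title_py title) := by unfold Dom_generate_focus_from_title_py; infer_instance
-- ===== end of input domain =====

-- B replaces A's if/elif chain of group checks by a single pass over a flat keyword->priority map keeping the minimum matching priority (alternative decomposition; same cost).


-- ===== PORT A =====
-- Port of A: the literal if/elif chain over `any(word in title_lower for word in [...])`.
def generate_focus_from_title_py (title : String) : String :=
  let title_lower := PySem.Str.lower title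
  if ["transformer", "attention", "bert", "gpt"].any (fun word => PySem.Str.isIn word title_lower) then
    "Transformer-based architecture for improved performance"
  else if ["diffusion", "generative", "gan"].any (fun word => PySem.Str.isIn word title_lower) then
    "Generative modeling and image synthesis"
  else if ["detection", "segmentation", "classification"].any (fun word => PySem.Str.isIn word title_lower) then
    "Computer vision and object recognition"
  else if ["graph", "network", "neural"].any (fun word => PySem.Str.isIn word title_lower) then
    "Neural network architecture and graph learning"
  else if ["quantization", "compression", "efficient"].any (fun word => PySem.Str.isIn word title_lower) then
    "Model optimization and efficiency improvements"
  else
    "Novel approach to machine learning challenges"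

-- ===== PORT B =====
-- B: one pass over the flat keyword->priority map, keeping the minimum matching priority.
def pvKeywordPriority : List (String × Nat) :=
  [ ("transformer", 0), ("attention", 0), ("bert", 0), ("gpt", 0),
    ("diffusion", 1), ("generative", 1), ("gan", 1),
    ("detection", 2), ("segmentation", 2), ("classification", 2),
    ("graph", 3), ("network", 3), ("neural", 3),
    ("quantization", 4), ("compression", 4), ("efficient", 4) ]

def pvFocuses : List String :=
  [ "Transformer-based architecture for improved performance",
    "Generative modeling and image synthesis",
    "Computer vision and object recognition",
    "Neural network architecture and graph learning",
    "Model optimization and efficiency improvements",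
    "Novel approach to machine learning challenges" ]

def generate_focus_from_title_py_alt (title : String) : String :=
  let title_lower := PySem.Str.lower title
  let best := pvKeywordPriority.foldl
    (fun best kp =>
      if kp.2 < best && PySem.Str.isIn kp.1 title_lower then kp.2 else best)
    (pvFocuses.length - 1)
  pvFocuses.getD best ""

-- ===== PRECONDITION & SPEC =====
def Spec_generate_focus_from_title_py (title : String) (out : String) : Prop := out = generate_focus_from_title_py_alt title
instance (title : String) (out : String) : Decidable (Spec_generate_focus_from_title_py title out) := by unfold Spec_generate_focus_from_title_py; infer_instance

-- ===== CLAIM (what is proved, stated in full; the proofs are below) =====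
def Claim_equal_generate_focus_from_title_py : Prop := ∀ (title : String), Dom_generate_focus_from_title_py title → Spec_generate_focus_from_title_py title (generate_focus_from_title_py title)

-- ===== LEMMAS AND PROOFS =====

-- The fold step of B's scan, keeping the minimum matching priority.
def pvStep (t : String) : Nat → (String × Nat) → Nat :=
  fun best kp => if kp.2 < best && PySem.Str.isIn kp.1 t then kp.2 else best

-- Once the accumulator equals the group's priority, the rest of the group leaves it unchanged.
theorem pv_foldl_stay (t : String) (p : Nat) (ws : List String) :
    (ws.map (fun w => (w, p))).foldl (pvStep t) p = p := by
  induction ws with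
  | nil => rfl
  | cons w ws ih => simp [pvStep, ih]

-- Folding one priority group: the accumulator drops to p iff p < best and some keyword matches.
theorem pv_foldl_group (t : String) (p b : Nat) (ws : List String) :
    (ws.map (fun w => (w, p))).foldl (pvStep t) b
      = if p < b && ws.any (fun w => PySem.Str.isIn w t) then p else b := by
  induction ws generalizing b with
  | nil => simp
  | cons w ws ih =>
    simp only [List.map_cons, List.foldl_cons, List.any_cons]
    by_cases hw : PySem.Str.isIn w t = true
    · have hwc := hw
      simp only [PySem.Str.isIn] at hwc
      by_cases hb : p < b
      · rw [show pvStep t b (w, p) = p from by simp only [pvStep, hw, Bool.and_true]; simp [hb]]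
        rw [pv_foldl_stay]
        simp [hwc, hb]
      · rw [show pvStep t b (w, p) = b from by simp only [pvStep, hw, Bool.and_true]; simp [hb]]
        rw [ih]
        simp [hb]
    · have hw' : PySem.Str.isIn w t = false := by simpa using hw
      have hwc : PySem.Chars.isIn w.toList t.toList = false := by
        simpa only [PySem.Str.isIn] using hw'
      rw [show pvStep t b (w, p) = b from by simp only [pvStep, hw', Bool.and_false]; simp]
      rw [ih]
      simp [hwc]

-- B's keyword map is the five priority groups in order.
theorem pv_rules_eq : pvKeywordPriority =
    (["transformer", "attention", "bert", "gpt"].map (fun w => (w, 0)))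
    ++ (["diffusion", "generative", "gan"].map (fun w => (w, 1)))
    ++ (["detection", "segmentation", "classification"].map (fun w => (w, 2)))
    ++ (["graph", "network", "neural"].map (fun w => (w, 3)))
    ++ (["quantization", "compression", "efficient"].map (fun w => (w, 4))) := rfl

-- ===== VERDICT (by name: the statement is the Claim_ definition above) =====
theorem generate_focus_from_title_py_spec : Claim_equal_generate_focus_from_title_py := by
  intro title _
  unfold Spec_generate_focus_from_title_py
  show (if ["transformer", "attention", "bert", "gpt"].any
            (fun w => PySem.Str.isIn w (PySem.Str.lower title)) then
          "Transformer-based architecture for improved performance"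
        else if ["diffusion", "generative", "gan"].any
            (fun w => PySem.Str.isIn w (PySem.Str.lower title)) then
          "Generative modeling and image synthesis"
        else if ["detection", "segmentation", "classification"].any
            (fun w => PySem.Str.isIn w (PySem.Str.lower title)) then
          "Computer vision and object recognition"
        else if ["graph", "network", "neural"].any
            (fun w => PySem.Str.isIn w (PySem.Str.lower title)) then
          "Neural network architecture and graph learning"
        else if ["quantization", "compression", "efficient"].any
            (fun w => PySem.Str.isIn w (PySem.Str.lower title)) then
          "Model optimization and efficiency improvements"
        else
          "Novel approach to machine learning challenges")
      = pvFocuses.getD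
          (pvKeywordPriority.foldl (pvStep (PySem.Str.lower title)) 5) ""
  rw [pv_rules_eq]
  simp only [List.foldl_append, pv_foldl_group]
  generalize (["transformer", "attention", "bert", "gpt"].any
      (fun w => PySem.Str.isIn w (PySem.Str.lower title))) = g0
  generalize (["diffusion", "generative", "gan"].any
      (fun w => PySem.Str.isIn w (PySem.Str.lower title))) = g1
  generalize (["detection", "segmentation", "classification"].any
      (fun w => PySem.Str.isIn w (PySem.Str.lower title))) = g2
  generalize (["graph", "network", "neural"].any
      (fun w => PySem.Str.isIn w (PySem.Str.lower title))) = g3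
  generalize (["quantization", "compression", "efficient"].any
      (fun w => PySem.Str.isIn w (PySem.Str.lower title))) = g4
  revert g0 g1 g2 g3 g4
  decide
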